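-- pv_equiv track=rewrite | github.com/Quinsh/unconflict | database.py | checkfreq
-- ===== SOURCE A (Python) =====
-- from collections import Counter
--
-- def checkfreq(comb_clust):
--     classtuple = tuple(comb_clust)
--
--     templist = [item for lst in classtuple for item in lst]
--     var_freq = Counter(templist)
--
--
--
--     most_common_variable = var_freq.most_common(1)
--     second_most_common_variable = var_freq.most_common(2)
--
--     tempstring = "<p>2 most common sections: <i id='occurence'>" + \
--         most_common_variable[0][0] + "</i> and <i id='occurence'>" + \
--         second_most_common_variable[1][0] + "</i> <br></p>"
--
--     return tempstring
-- ===== SOURCE B (Python) =====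
-- def checkfreq(comb_clust):
--     # one pass: count into a plain dict, then a linear best/second-best scan
--     counts = {}
--     for lst in comb_clust:
--         for item in lst:
--             counts[item] = counts.get(item, 0) + 1
--     best = None
--     second = None
--     for k, c in counts.items():
--         if best is None or c > best[1]:
--             second = best
--             best = (k, c)
--         elif second is None or c > second[1]:
--             second = (k, c)
--     top = []
--     if best is not None:
--         top.append(best)
--     if second is not None:
--         top.append(second)
--     return ("<p>2 most common sections: <i id='occurence'>" + top[0][0]
--             + "</i> and <i id='occurence'>" + top[1][0] + "</i> <br></p>")
-- ===== Notes on version B (the rewrite author's own statement) =====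
-- stated objective: alternative
-- what changed: Replaces Counter.most_common's sort-based top-2 selection with a plain counting dict plus a single linear best/second-best scan whose strict comparisons reproduce the stable insertion-order tie-break.
import Mathlib
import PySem

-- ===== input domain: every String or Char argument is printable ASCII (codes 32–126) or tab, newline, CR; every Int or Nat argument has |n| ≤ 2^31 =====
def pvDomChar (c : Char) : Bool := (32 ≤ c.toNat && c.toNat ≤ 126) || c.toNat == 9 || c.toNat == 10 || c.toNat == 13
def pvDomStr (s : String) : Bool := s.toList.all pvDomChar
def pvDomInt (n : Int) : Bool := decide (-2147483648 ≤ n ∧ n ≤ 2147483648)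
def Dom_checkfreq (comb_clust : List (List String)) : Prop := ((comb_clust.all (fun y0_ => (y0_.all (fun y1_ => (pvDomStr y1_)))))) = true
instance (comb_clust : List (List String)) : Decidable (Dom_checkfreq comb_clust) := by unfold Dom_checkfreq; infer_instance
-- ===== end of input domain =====

-- B replaces Counter.most_common's sort by a single linear best/second-best scan over a plain counting dict (alternative decomposition, same result).


-- ===== PORT A =====
-- most_common(n) = sorted(items, key=count, reverse=True)[:n]  (stable; Python-documented equivalence)
def checkfreq (comb_clust : List (List String)) : String :=
  let templist := comb_clust.foldl (fun acc lst => acc ++ lst) []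
  let var_freq : PySem.Dict String Int := PySem.Dict.counter templist
  let most_common_variable := (PySem.List.sorted var_freq.items (fun p => p.2) true).take 1
  let second_most_common_variable := (PySem.List.sorted var_freq.items (fun p => p.2) true).take 2
  match PySem.List.pyGet? most_common_variable 0, PySem.List.pyGet? second_most_common_variable 1 with
  | some m, some s =>
      "<p>2 most common sections: <i id='occurence'>" ++ m.1 ++
      "</i> and <i id='occurence'>" ++ s.1 ++ "</i> <br></p>"
  | _, _ => ""   -- Python raises IndexError here; excluded by Pre_checkfreq

-- ===== PORT B =====
-- the best/second-best scan step of Source B's second loop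
def pvStep (st : Option (String × Int) × Option (String × Int)) (kc : String × Int) :
    Option (String × Int) × Option (String × Int) :=
  match st.1 with
  | none => (some kc, st.1)
  | some b =>
      if b.2 < kc.2 then (some kc, st.1)
      else
        match st.2 with
        | none => (st.1, some kc)
        | some s => if s.2 < kc.2 then (st.1, some kc) else st

def checkfreq_alt (comb_clust : List (List String)) : String :=
  let counts : PySem.Dict String Int :=
    comb_clust.foldl (fun d lst => lst.foldl (fun d item => d.insert item (d.getD item 0 + 1)) d)
      PySem.Dict.empty
  let st := counts.items.foldl pvStep (none, none)
  let top : List (String × Int) := st.1.elim [] (fun b => [b]) ++ st.2.elim [] (fun s => [s])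
  ((PySem.List.pyGet? top 0).bind (fun t0 => (PySem.List.pyGet? top 1).map (fun t1 =>
      "<p>2 most common sections: <i id='occurence'>" ++ t0.1 ++
      "</i> and <i id='occurence'>" ++ t1.1 ++ "</i> <br></p>"))).getD ""
      -- .getD "": Python raises IndexError on the none case; excluded by Pre_checkfreq

-- ===== PRECONDITION & SPEC =====
-- Pre_ excludes inputs with fewer than two distinct flattened elements, on which A (and B) raise IndexError.
def Pre_checkfreq (comb_clust : List (List String)) : Prop :=
  2 ≤ (PySem.Set.ofList comb_clust.flatten).length
instance (comb_clust : List (List String)) : Decidable (Pre_checkfreq comb_clust) := by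
  unfold Pre_checkfreq; infer_instance
def pvWitness_checkfreq : List (List String) := [["a", "b"], ["a"]]
def Spec_checkfreq (comb_clust : List (List String)) (out : String) : Prop := out = checkfreq_alt comb_clust
instance (comb_clust : List (List String)) (out : String) : Decidable (Spec_checkfreq comb_clust out) := by unfold Spec_checkfreq; infer_instance

-- ===== CLAIM (what is proved, stated in full; the proofs are below) =====
def Claim_equal_checkfreq : Prop := ∀ (comb_clust : List (List String)), Dom_checkfreq comb_clust → Pre_checkfreq comb_clust → Spec_checkfreq comb_clust (checkfreq comb_clust)

-- ===== LEMMAS AND PROOFS =====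

-- A's list comprehension is the flattening of comb_clust
theorem pv_foldl_append_eq_flatten (l : List (List String)) (acc : List String) :
    l.foldl (fun acc lst => acc ++ lst) acc = acc ++ l.flatten := by
  induction l generalizing acc with
  | nil => simp
  | cons x xs ih => simp [List.foldl_cons, ih, List.append_assoc]

-- B's nested counting loops fold over the flattened list
theorem pv_foldl_nested_eq_flatten {σ : Type} (g : σ → String → σ) (l : List (List String)) (d : σ) :
    l.foldl (fun d lst => lst.foldl g d) d = l.flatten.foldl g d := by
  induction l generalizing d with
  | nil => rfl
  | cons x xs ih => simp [List.foldl_cons, List.flatten_cons, List.foldl_append, ih]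

-- the comparison insertion-sort (reverse=True) uses
def pvBf (a b : String × Int) : Bool := decide (b.2 < a.2)

-- one insertBy step changes the first two slots exactly as pvStep does
theorem pv_top2_insertBy (x : String × Int) (ys : List (String × Int)) :
    ((PySem.List.insertBy pvBf x ys)[0]?, (PySem.List.insertBy pvBf x ys)[1]?) =
      pvStep (ys[0]?, ys[1]?) x := by
  match ys with
  | [] => simp [PySem.List.insertBy, pvStep]
  | a :: t =>
    by_cases h1 : a.2 < x.2
    · simp [PySem.List.insertBy, pvBf, h1, pvStep]
    · match t with
      | [] => simp [PySem.List.insertBy, pvBf, h1, pvStep]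
      | a' :: t' =>
        by_cases h2 : a'.2 < x.2 <;>
          simp [PySem.List.insertBy, pvBf, h1, h2, pvStep]

-- the whole scan tracks the first two slots of the insertion sort
theorem pv_scan_eq_top2 (l : List (String × Int)) (ys : List (String × Int)) :
    l.foldl pvStep (ys[0]?, ys[1]?) =
      (((l.foldl (fun acc x => PySem.List.insertBy pvBf x acc) ys))[0]?,
       ((l.foldl (fun acc x => PySem.List.insertBy pvBf x acc) ys))[1]?) := by
  induction l generalizing ys with
  | nil => rfl
  | cons x xs ih =>
    simp only [List.foldl_cons]
    rw [← pv_top2_insertBy x ys, ih]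

-- ===== VERDICT (by name: the statement is the Claim_ definition above) =====
theorem checkfreq_spec : Claim_equal_checkfreq := by
  intro comb_clust _ _
  unfold Spec_checkfreq checkfreq checkfreq_alt
  simp only [pv_foldl_append_eq_flatten, List.nil_append,
    pv_foldl_nested_eq_flatten, PySem.Dict.foldl_insert_getD_add_one_eq_counter]
  have hb : pvBf = (fun a b : String × Int => decide ((fun p : String × Int => p.2) b < (fun p : String × Int => p.2) a)) := rfl
  have hscan := pv_scan_eq_top2 (PySem.Dict.counter comb_clust.flatten).items []
  simp only [List.getElem?_nil] at hscan
  rw [hscan, hb, ← PySem.List.sorted_rev_eq_foldl_insertBy]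
  generalize (PySem.List.sorted (PySem.Dict.counter comb_clust.flatten).items (fun p => p.2) true) = s
  match s with
  | [] => simp [PySem.List.pyGet?]
  | [a] => simp [PySem.List.pyGet?, PySem.List.pyIdx?]
  | a :: b :: t => simp [PySem.List.pyGet?, PySem.List.pyIdx?, List.take_succ_cons]
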